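-- pv_equiv track=rewrite | github.com/christoaluckal/coconut-coordinates | xml_testing/train_split.py | getBBKeys
-- ===== SOURCE A (Python) =====
-- def getBBKeys(box_list,width,height):
--     box_key = {}
--     for i in range(0,3):
--         for j in range(0,3):
--             box_key[str(i)+"_"+str(j)] = []
--     for x in box_list:
--         y_min,x_min,y_max,x_max = int(x[0]),int(x[1]),int(x[2]),int(x[3])
--         if(y_min < height//2):
--             if(x_min < width//2):
--                 if(y_max < height//2):
--                     if(x_max < width//2):
--                         box_key["0_0"].append([y_min,x_min,y_max,x_max])
--                     else:
--                         box_key["0_1"].append([y_min,x_min,y_max,x_max])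
--                 else:
--                     if(x_max < width //2):
--                         box_key["1_0"].append([y_min,x_min,y_max,x_max])
--                     else:
--                         box_key["1_1"].append([y_min,x_min,y_max,x_max])
--             else:
--                 if(y_max < height//2):
--                     box_key["0_2"].append([y_min,x_min,y_max,x_max])
--                 else:
--                     box_key["1_2"].append([y_min,x_min,y_max,x_max])
--         else:
--             if(x_min < width//2):
--                 if(x_max < width//2):
--                     box_key["2_0"].append([y_min,x_min,y_max,x_max])
--                 else:
--                     box_key["2_1"].append([y_min,x_min,y_max,x_max])
--             else:
--                 box_key["2_2"].append([y_min,x_min,y_max,x_max])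
--     return box_key
-- ===== SOURCE B (Python) =====
-- def getBBKeys(box_list, width, height):
--     h2, w2 = height // 2, width // 2
--     boxes = [[int(x[0]), int(x[1]), int(x[2]), int(x[3])] for x in box_list]
--
--     def key(b):
--         row = 2 if b[0] >= h2 else (1 if b[2] >= h2 else 0)
--         col = 2 if b[1] >= w2 else (1 if b[3] >= w2 else 0)
--         return str(row) + "_" + str(col)
--
--     return {str(r) + "_" + str(c): [b for b in boxes if key(b) == str(r) + "_" + str(c)]
--             for r in range(3) for c in range(3)}
-- ===== Notes on version B (the rewrite author's own statement) =====
-- stated objective: alternative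
-- what changed: Replaces A's single mutating pass with a 9-leaf nested if-tree by a staged approach: one pass normalizes the boxes, then each of the nine buckets is built independently by filtering on a factored row/col key; no dict mutation at all.
import Mathlib
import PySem

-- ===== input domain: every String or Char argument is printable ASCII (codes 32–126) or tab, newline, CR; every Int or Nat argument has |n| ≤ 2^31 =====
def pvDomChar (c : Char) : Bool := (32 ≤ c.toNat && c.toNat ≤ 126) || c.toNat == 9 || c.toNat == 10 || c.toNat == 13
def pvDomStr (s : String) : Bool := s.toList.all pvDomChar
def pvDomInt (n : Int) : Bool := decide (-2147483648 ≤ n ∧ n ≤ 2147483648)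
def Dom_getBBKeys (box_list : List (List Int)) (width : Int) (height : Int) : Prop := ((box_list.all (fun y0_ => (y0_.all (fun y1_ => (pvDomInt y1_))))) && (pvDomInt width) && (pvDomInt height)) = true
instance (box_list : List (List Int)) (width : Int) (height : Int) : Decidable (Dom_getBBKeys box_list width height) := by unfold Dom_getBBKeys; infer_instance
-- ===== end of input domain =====

-- B replaces A's single mutating pass with a nested if-tree by a staged build: normalize boxes once,
-- then construct each of the nine buckets independently by filtering on a factored row/col key (alternative decomposition, same cost).

-- ===== PORT A =====
-- the nested range(0,3) key-initialisation loop of A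
def pvInitA : PySem.Dict String (List (List Int)) :=
  (PySem.List.pyRange 0 3 1).foldl (fun d i =>
    (PySem.List.pyRange 0 3 1).foldl (fun d j =>
      d.insert (PySem.Int.toStr i ++ "_" ++ PySem.Int.toStr j) []) d) PySem.Dict.empty

-- one iteration of A's loop body (its nested decision tree); pyGetD is x[i], total under Pre_ (4 ≤ x.length)
def pvStepA (width height : Int) (d : PySem.Dict String (List (List Int))) (x : List Int) :
    PySem.Dict String (List (List Int)) :=
  let y_min := PySem.List.pyGetD x 0 0
  let x_min := PySem.List.pyGetD x 1 0
  let y_max := PySem.List.pyGetD x 2 0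
  let x_max := PySem.List.pyGetD x 3 0
  let v := [y_min, x_min, y_max, x_max]
  if y_min < PySem.Int.floordiv height 2 then
    if x_min < PySem.Int.floordiv width 2 then
      if y_max < PySem.Int.floordiv height 2 then
        if x_max < PySem.Int.floordiv width 2 then d.modify "0_0" [] (· ++ [v])
        else d.modify "0_1" [] (· ++ [v])
      else
        if x_max < PySem.Int.floordiv width 2 then d.modify "1_0" [] (· ++ [v])
        else d.modify "1_1" [] (· ++ [v])
    else
      if y_max < PySem.Int.floordiv height 2 then d.modify "0_2" [] (· ++ [v])
      else d.modify "1_2" [] (· ++ [v])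
  else
    if x_min < PySem.Int.floordiv width 2 then
      if x_max < PySem.Int.floordiv width 2 then d.modify "2_0" [] (· ++ [v])
      else d.modify "2_1" [] (· ++ [v])
    else d.modify "2_2" [] (· ++ [v])

def getBBKeys (box_list : List (List Int)) (width : Int) (height : Int) : List (String × List (List Int)) :=
  (box_list.foldl (pvStepA width height) pvInitA).items

-- ===== PORT B =====
-- the normalizing comprehension [ [int(x[0]),int(x[1]),int(x[2]),int(x[3])] for x in box_list ]
def pvNorm (x : List Int) : List Int :=
  [PySem.List.pyGetD x 0 0, PySem.List.pyGetD x 1 0, PySem.List.pyGetD x 2 0, PySem.List.pyGetD x 3 0]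

-- key(b): factored row/col classification
def pvKeyB (w2 h2 : Int) (b : List Int) : String :=
  let row : Int := if PySem.List.pyGetD b 0 0 ≥ h2 then 2 else if PySem.List.pyGetD b 2 0 ≥ h2 then 1 else 0
  let col : Int := if PySem.List.pyGetD b 1 0 ≥ w2 then 2 else if PySem.List.pyGetD b 3 0 ≥ w2 then 1 else 0
  PySem.Int.toStr row ++ "_" ++ PySem.Int.toStr col

-- the dict comprehension: nine independent filter passes over the normalized boxes
def getBBKeys_alt (box_list : List (List Int)) (width : Int) (height : Int) : List (String × List (List Int)) :=
  let h2 := PySem.Int.floordiv height 2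
  let w2 := PySem.Int.floordiv width 2
  let boxes := box_list.map pvNorm
  (PySem.List.pyRange 0 3 1).flatMap (fun r =>
    (PySem.List.pyRange 0 3 1).map (fun c =>
      (PySem.Int.toStr r ++ "_" ++ PySem.Int.toStr c,
       boxes.filter (fun b => pvKeyB w2 h2 b == PySem.Int.toStr r ++ "_" ++ PySem.Int.toStr c))))

-- ===== PRECONDITION & SPEC =====
-- Pre_ excludes boxes with fewer than 4 entries, on which Python A (and B) raises IndexError.
def Pre_getBBKeys (box_list : List (List Int)) (width : Int) (height : Int) : Prop :=
  ∀ x ∈ box_list, 4 ≤ x.length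
instance (box_list : List (List Int)) (width : Int) (height : Int) : Decidable (Pre_getBBKeys box_list width height) := by unfold Pre_getBBKeys; infer_instance

def pvWitness_getBBKeys : List (List Int) × Int × Int := ([[0, 3, 5, 7], [9, 9, 9, 9]], 10, 10)

def Spec_getBBKeys (box_list : List (List Int)) (width : Int) (height : Int) (out : List (String × List (List Int))) : Prop := out = getBBKeys_alt box_list width height
instance (box_list : List (List Int)) (width : Int) (height : Int) (out : List (String × List (List Int))) : Decidable (Spec_getBBKeys box_list width height out) := by unfold Spec_getBBKeys; infer_instance

-- ===== CLAIM =====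
def Claim_equal_getBBKeys : Prop := ∀ (box_list : List (List Int)) (width : Int) (height : Int), Dom_getBBKeys box_list width height → Pre_getBBKeys box_list width height → Spec_getBBKeys box_list width height (getBBKeys box_list width height)

-- ===== LEMMAS AND PROOFS =====

-- A's step is modify at the factored key of the normalized box
lemma pvStepA_eq_modify (width height : Int) (d : PySem.Dict String (List (List Int)))
    (x : List Int) (hx : 4 ≤ x.length) :
    pvStepA width height d x
      = d.modify (pvKeyB (PySem.Int.floordiv width 2) (PySem.Int.floordiv height 2) (pvNorm x))
          [] (· ++ [pvNorm x]) := by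
  match x, hx with
  | a :: b :: c :: e :: t, _ =>
    simp only [pvStepA, pvNorm, pvKeyB, PySem.List.pyGetD_zero_cons]
    have h1 : PySem.List.pyGetD (a :: b :: c :: e :: t) 1 (0:Int) = b := by
      simp [PySem.List.pyGetD_of_nonneg]
    have h2 : PySem.List.pyGetD (a :: b :: c :: e :: t) 2 (0:Int) = c := by
      simp [PySem.List.pyGetD_of_nonneg]
    have h3 : PySem.List.pyGetD (a :: b :: c :: e :: t) 3 (0:Int) = e := by
      simp [PySem.List.pyGetD_of_nonneg]
    have g1 : PySem.List.pyGetD [a, b, c, e] 1 (0:Int) = b := by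
      simp [PySem.List.pyGetD_of_nonneg]
    have g2 : PySem.List.pyGetD [a, b, c, e] 2 (0:Int) = c := by
      simp [PySem.List.pyGetD_of_nonneg]
    have g3 : PySem.List.pyGetD [a, b, c, e] 3 (0:Int) = e := by
      simp [PySem.List.pyGetD_of_nonneg]
    simp only [h1, h2, h3, g1, g2, g3]
    split_ifs <;> first | rfl | omega

lemma pvInitA_keys : pvInitA.keys =
    ["0_0", "0_1", "0_2", "1_0", "1_1", "1_2", "2_0", "2_1", "2_2"] := by decide

-- the grouping fold over the normalized boxes, as a fold over (key, box) pairs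
lemma pvFoldA_getD (boxes : List (List Int)) (w2 h2 : Int) (k : String) :
    ((boxes.map (fun b => (pvKeyB w2 h2 b, b))).foldl
        (fun d p => d.modify p.1 [] (· ++ [p.2])) pvInitA).getD k []
      = pvInitA.getD k [] ++ boxes.filter (fun b => pvKeyB w2 h2 b == k) := by
  rw [PySem.Dict.getD_foldl_modify_append]
  congr 1
  simp [List.filter_map, List.map_map, Function.comp_def]

lemma pvFoldA_keys (boxes : List (List Int)) (w2 h2 : Int) :
    ((boxes.map (fun b => (pvKeyB w2 h2 b, b))).foldl
        (fun d p => d.modify p.1 [] (· ++ [p.2])) pvInitA).keys = pvInitA.keys := by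
  rw [PySem.Dict.keys_foldl_modify_key (key := Prod.fst)]
  rw [PySem.Set.update_eq_append_filter]
  have : ∀ k ∈ (boxes.map (fun b => (pvKeyB w2 h2 b, b))).map Prod.fst, k ∈ pvInitA.keys := by
    intro k hk
    simp only [List.map_map, List.mem_map, Function.comp] at hk
    obtain ⟨b, -, rfl⟩ := hk
    simp only [pvKeyB, pvInitA_keys]
    split_ifs <;> decide
  rw [List.filter_eq_nil_iff.mpr, List.append_nil]
  intro k hk
  have hm := this k ((PySem.Set.mem_ofList _ _).mp hk)
  simpa using hm

-- A's whole loop is the grouping fold over (key, normalized box) pairs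
lemma pvFoldA (box_list : List (List Int)) (width height : Int)
    (hp : ∀ x ∈ box_list, 4 ≤ x.length) (d : PySem.Dict String (List (List Int))) :
    box_list.foldl (pvStepA width height) d
      = ((box_list.map pvNorm).map
           (fun b => (pvKeyB (PySem.Int.floordiv width 2) (PySem.Int.floordiv height 2) b, b))).foldl
          (fun d p => d.modify p.1 [] (· ++ [p.2])) d := by
  induction box_list generalizing d with
  | nil => rfl
  | cons y ys ih =>
    simp only [List.map_cons, List.foldl_cons]
    rw [pvStepA_eq_modify width height d y (hp y (by simp))]
    exact ih (fun x hx => hp x (by simp [hx])) _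

-- ===== VERDICT =====
theorem getBBKeys_spec : Claim_equal_getBBKeys := by
  intro bl w h _ hp
  unfold Spec_getBBKeys getBBKeys getBBKeys_alt
  rw [pvFoldA bl w h hp]
  have hnd : pvInitA.keys.Nodup := by rw [pvInitA_keys]; decide
  have hD := PySem.Dict.nodup_keys_foldl_modify_key
      ((bl.map pvNorm).map (fun b => (pvKeyB (PySem.Int.floordiv w 2) (PySem.Int.floordiv h 2) b, b)))
      Prod.fst [] (fun d p => (· ++ [p.2])) pvInitA hnd
  rw [PySem.Dict.items_eq_map_keys _ hD ([] : List (List Int))]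
  have hkeys := pvFoldA_keys (bl.map pvNorm) (PySem.Int.floordiv w 2) (PySem.Int.floordiv h 2)
  rw [hkeys, pvInitA_keys]
  have hr : PySem.List.pyRange 0 3 1 = [0, 1, 2] := by decide
  have e0 : PySem.Int.toStr (0 : Int) = "0" := by decide
  have e1 : PySem.Int.toStr (1 : Int) = "1" := by decide
  have e2 : PySem.Int.toStr (2 : Int) = "2" := by decide
  have hgetD := pvFoldA_getD (bl.map pvNorm) (PySem.Int.floordiv w 2) (PySem.Int.floordiv h 2)
  have g00 : pvInitA.getD "0_0" ([] : List (List Int)) = [] := by decide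
  have g01 : pvInitA.getD "0_1" ([] : List (List Int)) = [] := by decide
  have g02 : pvInitA.getD "0_2" ([] : List (List Int)) = [] := by decide
  have g10 : pvInitA.getD "1_0" ([] : List (List Int)) = [] := by decide
  have g11 : pvInitA.getD "1_1" ([] : List (List Int)) = [] := by decide
  have g12 : pvInitA.getD "1_2" ([] : List (List Int)) = [] := by decide
  have g20 : pvInitA.getD "2_0" ([] : List (List Int)) = [] := by decide
  have g21 : pvInitA.getD "2_1" ([] : List (List Int)) = [] := by decide
  have g22 : pvInitA.getD "2_2" ([] : List (List Int)) = [] := by decide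
  simp only [hr, List.flatMap_cons, List.flatMap_nil, List.map_cons, List.map_nil, List.append_nil,
    List.cons_append, List.nil_append, e0, e1, e2, hgetD]
  simp only [g00, g01, g02, g10, g11, g12, g20, g21, g22, List.nil_append]
  rfl
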